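-- pv_equiv track=rewrite | github.com/bingzhu1/stock-analyzer | services/avgo_1000day_training.py | _normalize_trading_days
-- ===== SOURCE A (Python) =====
-- from typing import Any, Callable
--
-- def _clean_text(value: Any, fallback: str = "") -> str:
--     text = str(value or "").strip()
--     return text if text else fallback
--
-- def _normalize_trading_days(days: list[Any]) -> list[str]:
--     normalized: list[str] = []
--     seen: set[str] = set()
--
--     for raw_day in days:
--         day = _clean_text(raw_day)
--         if not day or day in seen:
--             continue
--         seen.add(day)
--         normalized.append(day)
--
--     normalized.sort()
--     return normalized
-- ===== SOURCE B (Python) =====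
-- def _normalize_trading_days(days):
--     cleaned = sorted(d for d in (str(x or "").strip() for x in days) if d)
--     result = []
--     for d in cleaned:
--         if not result or d != result[-1]:
--             result.append(d)
--     return result
-- ===== Notes on version B (the rewrite author's own statement) =====
-- stated objective: idiomatic
-- what changed: B drops the 'seen' set entirely: it cleans and filters the strings, sorts them, and deduplicates by a single adjacency walk over the sorted list instead of set-membership during collection.
import Mathlib
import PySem

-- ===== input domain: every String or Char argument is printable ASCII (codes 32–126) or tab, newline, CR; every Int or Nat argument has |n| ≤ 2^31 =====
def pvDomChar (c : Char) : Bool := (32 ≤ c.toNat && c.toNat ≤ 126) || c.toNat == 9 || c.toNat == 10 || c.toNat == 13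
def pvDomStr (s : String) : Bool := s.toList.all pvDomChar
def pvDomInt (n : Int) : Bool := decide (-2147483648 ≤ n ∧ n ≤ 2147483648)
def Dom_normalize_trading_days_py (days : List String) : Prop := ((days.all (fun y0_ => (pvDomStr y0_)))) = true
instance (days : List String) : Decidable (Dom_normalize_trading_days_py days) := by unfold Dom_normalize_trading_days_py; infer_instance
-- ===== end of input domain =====

-- B replaces A's 'seen' set with sort-then-adjacent-dedup (clean, filter empties, sort, single adjacency walk); objective: idiomatic.


-- ===== PORT A =====
-- _clean_text(value, fallback=""): str(value or "").strip(); on a String argument 'value or ""' is value when nonempty else ""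
def clean_text_py (value : String) (fallback : String) : String :=
  let text := PySem.Str.strip (if value == "" then "" else value)
  if !(text == "") then text else fallback

-- one iteration of A's for-loop: state = (normalized, seen)
def stepA (acc : List String × PySem.Set String) (raw_day : String) : List String × PySem.Set String :=
  let day := clean_text_py raw_day ""
  if day == "" || PySem.Set.contains acc.2 day then acc
  else (acc.1 ++ [day], PySem.Set.add acc.2 day)

def normalize_trading_days_py (days : List String) : List String :=
  let st := days.foldl stepA ([], PySem.Set.empty)
  PySem.List.sorted st.1 (fun x => x) false

-- ===== PORT B =====
-- one iteration of B's adjacency walk: append d unless it equals the last kept element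
def stepB (res : List String) (d : String) : List String :=
  if res = [] ∨ res.getLast? ≠ some d then res ++ [d] else res

def normalize_trading_days_py_alt (days : List String) : List String :=
  let cleaned := PySem.List.sorted
    ((days.map (fun x => PySem.Str.strip (if x == "" then "" else x))).filter (fun d => !(d == "")))
    (fun x => x) false
  cleaned.foldl stepB []

-- ===== PRECONDITION & SPEC =====
def Spec_normalize_trading_days_py (days : List String) (out : List String) : Prop := out = normalize_trading_days_py_alt days
instance (days : List String) (out : List String) : Decidable (Spec_normalize_trading_days_py days out) := by unfold Spec_normalize_trading_days_py; infer_instance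

-- ===== CLAIM (what is proved, stated in full; the proofs are below) =====
def Claim_equal_normalize_trading_days_py : Prop := ∀ (days : List String), Dom_normalize_trading_days_py days → Spec_normalize_trading_days_py days (normalize_trading_days_py days)

-- ===== LEMMAS AND PROOFS =====

-- the cleaned values A's loop and B's pipeline both work over
def cleanFn (x : String) : String := PySem.Str.strip (if x == "" then "" else x)

lemma clean_text_eq (raw : String) : clean_text_py raw "" = cleanFn raw := by
  unfold clean_text_py cleanFn
  split <;> simp_all

-- A's loop, started with normalized = seen, keeps them equal and computes the Set.add-fold of the cleaned nonempty values
lemma loopA (days : List String) (s : PySem.Set String) :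
    days.foldl stepA (s, s) =
      (((days.map cleanFn).filter (fun d => !(d == ""))).foldl PySem.Set.add s,
       ((days.map cleanFn).filter (fun d => !(d == ""))).foldl PySem.Set.add s) := by
  induction days generalizing s with
  | nil => rfl
  | cons raw rest ih =>
    simp only [List.foldl_cons, List.map_cons, List.filter_cons]
    by_cases hemp : cleanFn raw = ""
    · have h1 : stepA (s, s) raw = (s, s) := by simp [stepA, clean_text_eq, hemp]
      rw [h1, if_neg (by simp [hemp])]
      exact ih s
    · rw [if_pos (by simp [hemp]), List.foldl_cons]
      by_cases hc : cleanFn raw ∈ s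
      · have h1 : stepA (s, s) raw = (s, s) := by
          simp [stepA, clean_text_eq, PySem.Set.contains, hc]
        have h2 : PySem.Set.add s (cleanFn raw) = s := by simp [PySem.Set.add, hc]
        rw [h1, h2]; exact ih s
      · have h1 : stepA (s, s) raw = (s ++ [cleanFn raw], s ++ [cleanFn raw]) := by
          simp [stepA, clean_text_eq, PySem.Set.contains, hemp, hc]
        have h2 : PySem.Set.add s (cleanFn raw) = s ++ [cleanFn raw] := by
          simp [PySem.Set.add, hc]
        rw [h1, h2]; exact ih (s ++ [cleanFn raw])

-- in a ≤-sorted accumulator every element is ≤ the last one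
lemma mem_le_getLast? : ∀ (acc : List String), acc.Pairwise (· ≤ ·) →
    ∀ a ∈ acc, ∃ l, acc.getLast? = some l ∧ a ≤ l := by
  intro acc
  induction acc with
  | nil => intro _ a ha; cases ha
  | cons x t ih =>
    intro h a ha
    cases t with
    | nil =>
      simp only [List.mem_singleton] at ha
      exact ⟨x, by simp [ha]⟩
    | cons y u =>
      have ht : (y :: u).Pairwise (· ≤ ·) := (List.pairwise_cons.mp h).2
      rcases List.mem_cons.mp ha with rfl | hmem
      · obtain ⟨l, hl, hyl⟩ := ih ht y List.mem_cons_self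
        exact ⟨l, by rw [List.getLast?_cons_cons]; exact hl,
          le_trans ((List.pairwise_cons.mp h).1 y List.mem_cons_self) hyl⟩
      · obtain ⟨l, hl, hal⟩ := ih ht a hmem
        exact ⟨l, by rw [List.getLast?_cons_cons]; exact hl, hal⟩

-- B's adjacency walk over a ≤-sorted list is the set-building fold
lemma loopB (ys : List String) (acc : List String)
    (hys : ys.Pairwise (· ≤ ·)) (hacc : acc.Pairwise (· ≤ ·))
    (hle : ∀ a ∈ acc, ∀ y ∈ ys, a ≤ y) :
    ys.foldl stepB acc = ys.foldl PySem.Set.add acc := by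
  induction ys generalizing acc with
  | nil => rfl
  | cons y rest ih =>
    have hmemiff : y ∈ acc ↔ ¬(acc = [] ∨ acc.getLast? ≠ some y) := by
      constructor
      · intro hy
        obtain ⟨l, hl, hyl⟩ := mem_le_getLast? acc hacc y hy
        have hly : l ≤ y := hle l (List.mem_of_getLast? hl) y List.mem_cons_self
        push_neg
        exact ⟨by rintro rfl; simp at hl, by rw [hl, le_antisymm hyl hly]⟩
      · intro hc
        push_neg at hc
        exact List.mem_of_getLast? hc.2
    have hstep : stepB acc y = PySem.Set.add acc y := by
      by_cases hy : y ∈ acc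
      · simp [stepB, PySem.Set.add, hy, hmemiff.mp hy]
      · have : acc = [] ∨ acc.getLast? ≠ some y := by
          by_contra h; exact hy (hmemiff.mpr h)
        simp [stepB, PySem.Set.add, hy, this]
    have hrest : rest.Pairwise (· ≤ ·) := (List.pairwise_cons.mp hys).2
    have hyrest : ∀ z ∈ rest, y ≤ z := (List.pairwise_cons.mp hys).1
    have hadd : (PySem.Set.add acc y).Pairwise (· ≤ ·) := by
      by_cases hy : y ∈ acc
      · simpa [PySem.Set.add, hy] using hacc
      · rw [show PySem.Set.add acc y = acc ++ [y] from by simp [PySem.Set.add, hy]]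
        refine List.pairwise_append.mpr ⟨hacc, by simp, ?_⟩
        intro a ha b hb
        simp only [List.mem_singleton] at hb
        rw [hb]
        exact hle a ha y List.mem_cons_self
    have hle' : ∀ a ∈ PySem.Set.add acc y, ∀ z ∈ rest, a ≤ z := by
      intro a ha z hz
      rcases (PySem.Set.mem_add acc y a).mp ha with h | rfl
      · exact le_trans (hle a h y List.mem_cons_self) (hyrest z hz)
      · exact hyrest z hz
    simp only [List.foldl_cons, hstep]
    exact ih (PySem.Set.add acc y) hrest hadd hle'

-- set(xs) (first occurrences) is a sublist of xs
lemma foldl_add_sublist (xs : List String) (acc : List String) :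
    ∃ t, xs.foldl PySem.Set.add acc = acc ++ t ∧ t.Sublist xs := by
  induction xs generalizing acc with
  | nil => exact ⟨[], by simp⟩
  | cons x rest ih =>
    by_cases hc : x ∈ acc
    · obtain ⟨t, ht, hs⟩ := ih acc
      refine ⟨t, ?_, hs.cons x⟩
      rw [List.foldl_cons, show PySem.Set.add acc x = acc from by simp [PySem.Set.add, hc]]
      exact ht
    · obtain ⟨t, ht, hs⟩ := ih (acc ++ [x])
      refine ⟨x :: t, ?_, hs.cons₂ x⟩
      rw [List.foldl_cons, show PySem.Set.add acc x = acc ++ [x] from by simp [PySem.Set.add, hc]]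
      simpa using ht

lemma ofList_sublist (xs : List String) : (PySem.Set.ofList xs).Sublist xs := by
  obtain ⟨t, ht, hs⟩ := foldl_add_sublist xs []
  rw [PySem.Set.ofList_eq_foldl, ht]; simpa using hs

lemma ofList_pairwise_lt (ys : List String) (h : ys.Pairwise (· ≤ ·)) :
    (PySem.Set.ofList ys).Pairwise (· < ·) := by
  have hle : (PySem.Set.ofList ys).Pairwise (· ≤ ·) := h.sublist (ofList_sublist ys)
  have hne : (PySem.Set.ofList ys).Pairwise (· ≠ ·) := PySem.Set.nodup_ofList ys
  exact (hle.and hne).imp (fun h => lt_of_le_of_ne h.1 h.2)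

-- ===== VERDICT (by name: the statement is the Claim_ definition above) =====
theorem normalize_trading_days_py_spec : Claim_equal_normalize_trading_days_py := by
  intro days _
  unfold Spec_normalize_trading_days_py normalize_trading_days_py normalize_trading_days_py_alt
  rw [show (fun x => PySem.Str.strip (if x == "" then "" else x)) = cleanFn from rfl]
  set cs := (days.map cleanFn).filter (fun d => !(d == "")) with hcs
  have hA : days.foldl stepA ([], PySem.Set.empty) = (PySem.Set.ofList cs, PySem.Set.ofList cs) := by
    rw [show (([], PySem.Set.empty) : List String × PySem.Set String)
        = ((([] : List String)), (([] : List String))) from rfl]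
    rw [loopA days [], ← PySem.Set.ofList_eq_foldl]
  have hsorted : (PySem.List.sorted cs (fun x => x) false).Pairwise (· ≤ ·) :=
    PySem.List.sorted_pairwise cs (fun x => x)
  have hB : (PySem.List.sorted cs (fun x => x) false).foldl stepB [] =
      PySem.Set.ofList (PySem.List.sorted cs (fun x => x) false) := by
    rw [loopB _ [] hsorted (by simp) (by simp), ← PySem.Set.ofList_eq_foldl]
  simp only [hA]
  rw [hB]
  apply PySem.List.sorted_eq_of_perm_of_pairwise_lt
  · refine (List.perm_ext_iff_of_nodup (PySem.Set.nodup_ofList _) (PySem.Set.nodup_ofList _)).mpr ?_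
    intro a
    simp [PySem.Set.mem_ofList, PySem.List.mem_sorted]
  · exact ofList_pairwise_lt _ hsorted
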